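-- pv_equiv track=rewrite | github.com/Ironsail-llc/robothor | brain/scripts/nightwatch_lib.py | check_pause_condition
-- ===== SOURCE A (Python) =====
-- def check_pause_condition(nightwatch_log: str) -> bool:
--     """Check if nightwatch should be paused (3 consecutive rejections).
--
--     Returns True if paused (should NOT proceed).
--     """
--     if "PAUSED" in nightwatch_log:
--         return True
--
--     # Look for last 3 PR outcomes
--     lines = nightwatch_log.strip().split("\n")
--     outcomes = []
--     for line in reversed(lines):
--         if "outcome:" in line.lower():
--             if "rejected" in line.lower():
--                 outcomes.append("rejected")
--             elif "merged" in line.lower():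
--                 outcomes.append("merged")
--             elif "modified" in line.lower():
--                 outcomes.append("modified")
--             if len(outcomes) >= 3:
--                 break
--
--     return len(outcomes) >= 3 and all(o == "rejected" for o in outcomes)
-- ===== SOURCE B (Python) =====
-- def _classify(line):
--     """Classify one log line: the first matching outcome keyword, or None."""
--     low = line.lower()
--     if "outcome:" not in low:
--         return None
--     for kw in ("rejected", "merged", "modified"):
--         if kw in low:
--             return kw
--     return None
--
--
-- def check_pause_condition(nightwatch_log: str) -> bool:
--     """Check if nightwatch should be paused (3 consecutive rejections).
--
--     Returns True if paused (should NOT proceed).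
--     """
--     if "PAUSED" in nightwatch_log:
--         return True
--     outcomes = [o for o in map(_classify, nightwatch_log.strip().split("\n"))
--                 if o is not None]
--     return len(outcomes) >= 3 and outcomes[-3:] == ["rejected"] * 3
-- ===== Notes on version B (the rewrite author's own statement) =====
-- stated objective: simpler
-- what changed: B replaces A's backward walk with early break and an accumulator by a single forward pass that classifies every line via a helper into a filtered list, then compares the last-3 slice against ["rejected"]*3.
import Mathlib
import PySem

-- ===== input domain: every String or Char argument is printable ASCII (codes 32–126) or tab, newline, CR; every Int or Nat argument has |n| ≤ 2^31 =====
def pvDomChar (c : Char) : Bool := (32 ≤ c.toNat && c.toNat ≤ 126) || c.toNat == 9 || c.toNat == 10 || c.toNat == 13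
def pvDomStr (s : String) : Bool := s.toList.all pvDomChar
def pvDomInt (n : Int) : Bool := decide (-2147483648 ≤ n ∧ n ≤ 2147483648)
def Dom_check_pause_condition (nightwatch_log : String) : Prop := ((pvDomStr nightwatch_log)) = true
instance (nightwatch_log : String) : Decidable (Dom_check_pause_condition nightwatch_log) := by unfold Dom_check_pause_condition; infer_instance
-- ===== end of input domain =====

-- B classifies all lines in one forward pass and slices the last 3 outcomes, instead of A's
-- backward walk with an early break; same result, simpler decomposition (no speed claim).

-- ===== PORT A =====
-- the 'for line in reversed(lines): … break' loop of A, outcomes accumulator appended at the end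
def aLoop : List String → List String → List String
  | [], outcomes => outcomes
  | line :: rest, outcomes =>
    if PySem.Str.isIn "outcome:" (PySem.Str.lower line) then
      let outcomes' :=
        if PySem.Str.isIn "rejected" (PySem.Str.lower line) then outcomes ++ ["rejected"]
        else if PySem.Str.isIn "merged" (PySem.Str.lower line) then outcomes ++ ["merged"]
        else if PySem.Str.isIn "modified" (PySem.Str.lower line) then outcomes ++ ["modified"]
        else outcomes
      if outcomes'.length ≥ 3 then outcomes' else aLoop rest outcomes'
    else aLoop rest outcomes

def check_pause_condition (nightwatch_log : String) : Bool :=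
  if PySem.Str.isIn "PAUSED" nightwatch_log then true
  else
    let lines := (PySem.Str.split? (PySem.Str.strip nightwatch_log) "\n").getD []
    let outcomes := aLoop lines.reverse []
    decide (outcomes.length ≥ 3) && outcomes.all (fun o => o == "rejected")

-- ===== PORT B =====
-- B's helper _classify: first matching outcome keyword, or None
def bClassify (line : String) : Option String :=
  let low := PySem.Str.lower line
  if ¬ PySem.Str.isIn "outcome:" low then none
  else ["rejected", "merged", "modified"].find? (fun kw => PySem.Str.isIn kw low)

def check_pause_condition_alt (nightwatch_log : String) : Bool :=
  if PySem.Str.isIn "PAUSED" nightwatch_log then true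
  else
    let outcomes :=
      (((PySem.Str.split? (PySem.Str.strip nightwatch_log) "\n").getD []).map bClassify).filterMap id
    decide (outcomes.length ≥ 3) &&
      decide (PySem.List.slice outcomes (some (-3)) none = ["rejected", "rejected", "rejected"])

-- ===== PRECONDITION & SPEC =====
def Spec_check_pause_condition (nightwatch_log : String) (out : Bool) : Prop := out = check_pause_condition_alt nightwatch_log
instance (nightwatch_log : String) (out : Bool) : Decidable (Spec_check_pause_condition nightwatch_log out) := by unfold Spec_check_pause_condition; infer_instance

-- ===== CLAIM (what is proved, stated in full; the proofs are below) =====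
def Claim_equal_check_pause_condition : Prop := ∀ (nightwatch_log : String), Dom_check_pause_condition nightwatch_log → Spec_check_pause_condition nightwatch_log (check_pause_condition nightwatch_log)

-- ===== LEMMAS AND PROOFS =====

-- the nested-if append of A's loop body is 'append the classification, if any'
theorem aStep_eq (line : String) (acc : List String)
    (h : PySem.Str.isIn "outcome:" (PySem.Str.lower line) = true) :
    (if PySem.Str.isIn "rejected" (PySem.Str.lower line) then acc ++ ["rejected"]
     else if PySem.Str.isIn "merged" (PySem.Str.lower line) then acc ++ ["merged"]
     else if PySem.Str.isIn "modified" (PySem.Str.lower line) then acc ++ ["modified"]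
     else acc) = acc ++ (bClassify line).toList := by
  by_cases hr : PySem.Str.isIn "rejected" (PySem.Str.lower line) = true <;>
    by_cases hm : PySem.Str.isIn "merged" (PySem.Str.lower line) = true <;>
      by_cases hmo : PySem.Str.isIn "modified" (PySem.Str.lower line) = true <;>
        simp_all [bClassify, List.find?]

theorem bClassify_eq_none (line : String)
    (h : ¬ PySem.Str.isIn "outcome:" (PySem.Str.lower line) = true) :
    bClassify line = none := by
  simp only [bClassify]
  rw [if_pos h]

-- A's early-breaking backward loop computes the 3-element prefix of the full classification
theorem aLoop_eq (l : List String) (acc : List String) (hacc : acc.length < 3) :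
    aLoop l acc = (acc ++ l.filterMap bClassify).take 3 := by
  induction l generalizing acc with
  | nil =>
    simp only [aLoop, List.filterMap_nil, List.append_nil]
    rw [List.take_of_length_le (by omega)]
  | cons line rest ih =>
    by_cases h : PySem.Str.isIn "outcome:" (PySem.Str.lower line) = true
    · simp only [aLoop]
      rw [if_pos h, aStep_eq line acc h]
      cases hcl : bClassify line with
      | none =>
        simp only [Option.toList_none, List.append_nil]
        rw [if_neg (by omega), ih acc hacc]
        simp [hcl]
      | some x =>
        simp only [Option.toList_some]
        by_cases h3 : (acc ++ [x]).length ≥ 3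
        · rw [if_pos h3]
          have hlen : (acc ++ [x]).length = 3 := by simp at h3 ⊢; omega
          rw [List.filterMap_cons, hcl, show acc ++ x :: rest.filterMap bClassify
              = (acc ++ [x]) ++ rest.filterMap bClassify by simp]
          rw [← hlen, List.take_left]
        · rw [if_neg h3, ih (acc ++ [x]) (by omega)]
          simp [hcl]
    · simp only [aLoop]
      rw [if_neg h, ih acc hacc]
      simp [bClassify_eq_none line h]

-- a length-3 list is all-"rejected" iff it IS ["rejected","rejected","rejected"]
theorem all_rejected_len3 (l : List String) (h : l.length = 3) :
    l.all (fun o => o == "rejected")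
      = decide (l = ["rejected", "rejected", "rejected"]) := by
  match l, h with
  | [a, b, c], _ =>
    simp only [List.all_cons, List.all_nil, Bool.and_true, List.cons.injEq, and_true]
    by_cases ha : a = "rejected" <;> by_cases hb : b = "rejected" <;>
      by_cases hc : c = "rejected" <;> simp [ha, hb, hc]

-- ===== VERDICT (by name: the statement is the Claim_ definition above) =====
theorem check_pause_condition_spec : Claim_equal_check_pause_condition := by
  intro log _
  unfold Spec_check_pause_condition check_pause_condition check_pause_condition_alt
  by_cases hp : PySem.Str.isIn "PAUSED" log = true
  · rw [if_pos hp, if_pos hp]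
  · simp only [hp, if_false, Bool.false_eq_true]
    set lines := (PySem.Str.split? (PySem.Str.strip log) "\n").getD [] with hlines
    have hmap : (lines.map bClassify).filterMap id = lines.filterMap bClassify := by
      simp [List.filterMap_map]
    rw [hmap]
    set F := lines.filterMap bClassify with hF
    have hrev : lines.reverse.filterMap bClassify = F.reverse := by
      rw [hF, List.filterMap_reverse]
    rw [aLoop_eq lines.reverse [] (by simp), List.nil_append, hrev]
    rw [PySem.List.slice_from_neg_ofNat F 3 (by omega)]
    by_cases hlen : F.length ≥ 3
    · have hT : (F.reverse.take 3) = (F.drop (F.length - 3)).reverse := by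
        exact List.take_reverse
      rw [hT]
      have hD : (F.drop (F.length - 3)).length = 3 := by simp; omega
      simp only [List.length_reverse, hD, List.all_reverse]
      rw [all_rejected_len3 _ hD]
      simp [hlen]
    · have : (F.reverse.take 3).length < 3 := by simp; omega
      have hd : (F.drop (F.length - 3)).length < 3 := by simp; omega
      
      have h1 : decide ((F.reverse.take 3).length ≥ 3) = false := by simp; omega
      have h2 : decide (F.length ≥ 3) = false := by simp; omega
      simp [h2]
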